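-- pv_equiv track=rewrite | github.com/RIMS-Code/rims-code.github.io | scripts/cern_dbj_converter.py | symbol_replacer
-- ===== SOURCE A (Python) =====
-- def symbol_replacer(str_in: str):
--     """Replaces common abbreviations in CERN db string with symbols."""
--     replacements = {
--         "&deg;": "{\\circ}",
--         "&lt;=": "≤",
--         "&lt;": "<",
--         "&gt;": ">",
--         "^{-1}": "<sup>-1</sup>",
--     }
--     for key, value in replacements.items():
--         str_in = str_in.replace(key, value)
--     return str_in
-- ===== SOURCE B (Python) =====
-- def symbol_replacer(str_in: str):
--     """Replaces common abbreviations in CERN db string with symbols."""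
--     replacements = {
--         "&deg;": "{\\circ}",
--         "&lt;=": "≤",
--         "&lt;": "<",
--         "&gt;": ">",
--         "^{-1}": "<sup>-1</sup>",
--     }
--     out = []
--     i = 0
--     n = len(str_in)
--     while i < n:
--         for key, value in replacements.items():
--             if str_in.startswith(key, i):
--                 out.append(value)
--                 i += len(key)
--                 break
--         else:
--             out.append(str_in[i])
--             i += 1
--     return "".join(out)
-- ===== Notes on version B (the rewrite author's own statement) =====
-- stated objective: alternative
-- what changed: A runs five sequential full str.replace scans, one per table entry; B makes a single left-to-right pass over the string, trying the keys in priority order at each position and jumping past a match (valid because no replacement value can recreate or extend a key occurrence and the overlapping pair '&lt;='/'&lt;' is checked longest-first).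
import Mathlib
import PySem

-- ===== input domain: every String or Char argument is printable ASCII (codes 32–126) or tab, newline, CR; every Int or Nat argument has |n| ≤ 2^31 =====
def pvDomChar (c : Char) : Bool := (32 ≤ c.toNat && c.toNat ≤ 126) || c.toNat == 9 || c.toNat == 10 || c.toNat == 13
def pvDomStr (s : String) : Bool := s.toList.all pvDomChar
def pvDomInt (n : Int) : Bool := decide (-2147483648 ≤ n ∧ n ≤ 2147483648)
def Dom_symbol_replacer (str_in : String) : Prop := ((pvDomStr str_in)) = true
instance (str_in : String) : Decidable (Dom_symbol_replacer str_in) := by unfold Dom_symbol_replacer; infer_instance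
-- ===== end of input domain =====

-- B replaces A's five sequential str.replace scans by a single left-to-right pass that
-- checks the keys in priority order at each position (objective: alternative, one pass).

-- ===== PORT A =====
def symbol_replacer (str_in : String) : String :=
  let replacements : PySem.Dict String String :=
    (((((PySem.Dict.empty).insert "&deg;" "{\\circ}").insert "&lt;=" "≤").insert
        "&lt;" "<").insert "&gt;" ">").insert "^{-1}" "<sup>-1</sup>"
  replacements.items.foldl (fun s kv => PySem.Str.replace s kv.1 kv.2) str_in

-- ===== PORT B =====
-- the five (key, value) pairs of Source B's dict, as char lists, in priority order
def pvK1 : List Char := ['&','d','e','g',';']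
def pvV1 : List Char := ['{','\\','c','i','r','c','}']
def pvK2 : List Char := ['&','l','t',';','=']
def pvV2 : List Char := ['≤']
def pvK3 : List Char := ['&','l','t',';']
def pvV3 : List Char := ['<']
def pvK4 : List Char := ['&','g','t',';']
def pvV4 : List Char := ['>']
def pvK5 : List Char := ['^','{','-','1','}']
def pvV5 : List Char := ['<','s','u','p','>','-','1','<','/','s','u','p','>']

-- Source B's while loop: at each position try the keys in order, on a match emit the value and
-- jump past the key, otherwise emit one character and advance by one
def pvAltGo (x : List Char) : List Char :=
  match x with
  | [] => []
  | c :: t =>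
    if pvK1.isPrefixOf (c :: t) then pvV1 ++ pvAltGo (t.drop 4)
    else if pvK2.isPrefixOf (c :: t) then pvV2 ++ pvAltGo (t.drop 4)
    else if pvK3.isPrefixOf (c :: t) then pvV3 ++ pvAltGo (t.drop 3)
    else if pvK4.isPrefixOf (c :: t) then pvV4 ++ pvAltGo (t.drop 3)
    else if pvK5.isPrefixOf (c :: t) then pvV5 ++ pvAltGo (t.drop 4)
    else c :: pvAltGo t
termination_by x.length
decreasing_by all_goals (simp only [List.length_drop, List.length_cons]; omega)

def symbol_replacer_alt (str_in : String) : String :=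
  String.ofList (pvAltGo str_in.toList)

-- ===== PRECONDITION & SPEC =====
def Spec_symbol_replacer (str_in : String) (out : String) : Prop := out = symbol_replacer_alt str_in
instance (str_in : String) (out : String) : Decidable (Spec_symbol_replacer str_in out) := by unfold Spec_symbol_replacer; infer_instance

-- ===== CLAIM (what is proved, stated in full; the proofs are below) =====
def Claim_equal_symbol_replacer : Prop := ∀ (str_in : String), Dom_symbol_replacer str_in → Spec_symbol_replacer str_in (symbol_replacer str_in)

-- ===== LEMMAS AND PROOFS =====

-- clean structural form of PySem.Chars.replace for a NONEMPTY needle o :: os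
def pvRepl (o : Char) (os new : List Char) (x : List Char) : List Char :=
  match x with
  | [] => []
  | c :: t =>
    if (o :: os).isPrefixOf (c :: t) then new ++ pvRepl o os new (t.drop os.length)
    else c :: pvRepl o os new t
termination_by x.length
decreasing_by all_goals (simp only [List.length_drop, List.length_cons]; omega)

theorem pvGo_eq (o : Char) (os new : List Char) :
    ∀ (fuel : Nat) (l acc : List Char), l.length ≤ fuel →
      PySem.Chars.replace.go (o :: os) new fuel l acc = acc.reverse ++ pvRepl o os new l := by
  intro fuel
  induction fuel with
  | zero =>
      intro l acc h
      have hl : l = [] := by cases l <;> simp_all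
      subst hl; simp [PySem.Chars.replace.go, pvRepl]
  | succ n ih =>
      intro l acc h
      cases l with
      | nil => simp [PySem.Chars.replace.go, pvRepl]
      | cons c t =>
          simp only [PySem.Chars.replace.go]
          by_cases hp : (o :: os).isPrefixOf (c :: t) = true
          · simp only [hp, if_pos]
            have hlen : (List.drop (o :: os).length (c :: t)).length ≤ n := by
              simp at h ⊢; omega
            rw [ih _ _ hlen]
            have hd : List.drop (o :: os).length (c :: t) = t.drop os.length := by
              simp [List.drop_succ_cons]
            rw [hd]
            conv_rhs => rw [pvRepl]
            simp [hp]
          · simp only [hp]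
            have hlen : t.length ≤ n := by simp at h; omega
            rw [ih _ _ hlen]
            conv_rhs => rw [pvRepl]
            simp [hp]

theorem pvReplace_eq (o : Char) (os new s : List Char) :
    PySem.Chars.replace s (o :: os) new = pvRepl o os new s := by
  rw [PySem.Chars.replace]
  simp [pvGo_eq o os new s.length s [] (le_refl _)]

-- compatibility of two lists: one is a prefix of the other
def pvCompat (a b : List Char) : Bool := a.isPrefixOf b || b.isPrefixOf a

theorem pvPrefix_append_compat (k b x : List Char)
    (h : k.isPrefixOf (b ++ x) = true) : pvCompat b k = true := by
  have h' : k <+: b ++ x := List.isPrefixOf_iff_prefix.mp h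
  rcases List.prefix_or_prefix_of_prefix h' (List.prefix_append b x) with h2 | h2 <;>
    simp [pvCompat, List.isPrefixOf_iff_prefix, h2]

-- if no tail of k' is compatible with the inserted value, replacement cannot create a k' prefix
theorem pvRepl_startsWith (o : Char) (os new : List Char) :
    ∀ (x k' : List Char), (∀ p < k'.length, pvCompat new (k'.drop p) = false) →
      k'.isPrefixOf (pvRepl o os new x) = true → k'.isPrefixOf x = true := by
  intro x
  fun_induction pvRepl o os new x with
  | case1 => intro k' _ h; cases k' <;> simp_all [List.isPrefixOf]
  | case2 c t hp ih =>
      intro k' hc h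
      cases k' with
      | nil => simp [List.isPrefixOf]
      | cons a k'' =>
          exfalso
          have h0 := hc 0 (by simp)
          simp only [List.drop_zero] at h0
          have hcm := pvPrefix_append_compat (a :: k'') new _ h
          rw [h0] at hcm
          exact absurd hcm (by simp)
  | case3 c t hp ih =>
      intro k' hc h
      cases k' with
      | nil => simp [List.isPrefixOf]
      | cons a k'' =>
          simp only [List.isPrefixOf, Bool.and_eq_true] at h ⊢
          obtain ⟨hac, h'⟩ := h
          exact ⟨hac, ih k'' (fun p hp' => hc (p + 1) (by simp only [List.length_cons]; omega)) h'⟩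

-- replacement distributes over a prefix u none of whose tails is compatible with the needle
theorem pvRepl_append (o : Char) (os new : List Char) :
    ∀ (u x : List Char), (∀ p < u.length, pvCompat (u.drop p) (o :: os) = false) →
      pvRepl o os new (u ++ x) = u ++ pvRepl o os new x := by
  intro u
  induction u with
  | nil => intro x _; simp
  | cons c u' ih =>
      intro x hc
      have h0 := hc 0 (by simp)
      simp only [List.drop_zero] at h0
      have hnp : (o :: os).isPrefixOf (c :: (u' ++ x)) = false := by
        by_contra hcon
        have hcm := pvPrefix_append_compat (o :: os) (c :: u') x
          (by simpa using Bool.of_not_eq_false hcon)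
        rw [h0] at hcm
        exact absurd hcm (by simp)
      rw [List.cons_append, pvRepl]
      simp only [hnp, Bool.false_eq_true, if_false]
      rw [ih x (fun p hp' => hc (p + 1) (by simp only [List.length_cons]; omega))]
      simp

-- the needle fires on its own occurrence at the front
theorem pvRepl_fire (o : Char) (os new : List Char) (x : List Char) :
    pvRepl o os new ((o :: os) ++ x) = new ++ pvRepl o os new x := by
  rw [List.cons_append, pvRepl]
  have hp : (o :: os).isPrefixOf (o :: (os ++ x)) = true :=
    List.isPrefixOf_iff_prefix.mpr (by simp)
  simp [hp]

-- A's whole pipeline, at the char-list level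
def pvChain (x : List Char) : List Char :=
  pvRepl '^' ['{','-','1','}'] pvV5
    (pvRepl '&' ['g','t',';'] pvV4
      (pvRepl '&' ['l','t',';'] pvV3
        (pvRepl '&' ['l','t',';','='] pvV2
          (pvRepl '&' ['d','e','g',';'] pvV1 x))))

-- the one overlapping pair: "&lt;=" does not fire on "&lt;" when no '=' follows
theorem pvRepl_lt (y : List Char) (h : ['='].isPrefixOf y = false) :
    pvRepl '&' ['l','t',';','='] pvV2 (['&','l','t',';'] ++ y)
      = ['&','l','t',';'] ++ pvRepl '&' ['l','t',';','='] pvV2 y := by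
  have h1 : (['&','l','t',';','='] : List Char).isPrefixOf ('&' :: (['l','t',';'] ++ y)) = false := by
    simpa only [List.cons_append, List.isPrefixOf, beq_self_eq_true, Bool.true_and,
      List.nil_append] using h
  rw [show ((['&','l','t',';'] : List Char) ++ y) = '&' :: (['l','t',';'] ++ y) by simp]
  rw [pvRepl]
  simp only [h1, Bool.false_eq_true, if_false]
  rw [pvRepl_append _ _ _ (['l','t',';'] : List Char) y (by decide)]
  simp

theorem pvChain_eq_altGo : ∀ (x : List Char), pvChain x = pvAltGo x := by
  intro x
  fun_induction pvAltGo x with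
  | case1 => simp [pvChain, pvRepl]
  | case2 c t h1 ih =>
      obtain ⟨x', hx⟩ := List.isPrefixOf_iff_prefix.mp h1
      simp only [pvK1, List.cons_append] at hx
      obtain ⟨hc, ht⟩ := List.cons_eq_cons.mp hx
      subst hc; subst ht
      simp only [List.drop_succ_cons, List.drop_zero, List.nil_append] at *
      unfold pvChain
      rw [show ('&'::'d'::'e'::'g'::';'::x' : List Char) = ('&'::['d','e','g',';']) ++ x' by simp,
          pvRepl_fire,
          pvRepl_append '&' ['l','t',';','='] pvV2 pvV1 _ (by decide),
          pvRepl_append '&' ['l','t',';'] pvV3 pvV1 _ (by decide),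
          pvRepl_append '&' ['g','t',';'] pvV4 pvV1 _ (by decide),
          pvRepl_append '^' ['{','-','1','}'] pvV5 pvV1 _ (by decide)]
      exact congrArg (pvV1 ++ ·) ih
  | case3 c t h1 h2 ih =>
      obtain ⟨x', hx⟩ := List.isPrefixOf_iff_prefix.mp h2
      simp only [pvK2, List.cons_append] at hx
      obtain ⟨hc, ht⟩ := List.cons_eq_cons.mp hx
      subst hc; subst ht
      simp only [List.drop_succ_cons, List.drop_zero, List.nil_append] at *
      unfold pvChain
      rw [show ('&'::'l'::'t'::';'::'='::x' : List Char) = ('&'::['l','t',';','=']) ++ x' by simp,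
          pvRepl_append '&' ['d','e','g',';'] pvV1 ('&'::['l','t',';','=']) _ (by decide),
          pvRepl_fire,
          pvRepl_append '&' ['l','t',';'] pvV3 pvV2 _ (by decide),
          pvRepl_append '&' ['g','t',';'] pvV4 pvV2 _ (by decide),
          pvRepl_append '^' ['{','-','1','}'] pvV5 pvV2 _ (by decide)]
      exact congrArg (pvV2 ++ ·) ih
  | case4 c t h1 h2 h3 ih =>
      obtain ⟨x', hx⟩ := List.isPrefixOf_iff_prefix.mp h3
      simp only [pvK3, List.cons_append] at hx
      obtain ⟨hc, ht⟩ := List.cons_eq_cons.mp hx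
      subst hc; subst ht
      simp only [List.drop_succ_cons, List.drop_zero, List.nil_append] at *
      have h2' : (['='] : List Char).isPrefixOf x' = false := by
        simpa only [pvK2, List.isPrefixOf, beq_self_eq_true, Bool.true_and,
          Bool.not_eq_true] using h2
      unfold pvChain
      rw [show ('&'::'l'::'t'::';'::x' : List Char) = ['&','l','t',';'] ++ x' by simp,
          pvRepl_append '&' ['d','e','g',';'] pvV1 (['&','l','t',';']) _ (by decide)]
      have hne : (['='] : List Char).isPrefixOf (pvRepl '&' ['d','e','g',';'] pvV1 x') = false := by
        by_contra hcon
        have hpx := pvRepl_startsWith '&' ['d','e','g',';'] pvV1 x' ['=']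
          (by decide) (Bool.of_not_eq_false hcon)
        rw [hpx] at h2'
        exact absurd h2' (by simp)
      rw [pvRepl_lt _ hne,
          show (['&','l','t',';'] : List Char) = '&'::['l','t',';'] by rfl,
          pvRepl_fire,
          pvRepl_append '&' ['g','t',';'] pvV4 pvV3 _ (by decide),
          pvRepl_append '^' ['{','-','1','}'] pvV5 pvV3 _ (by decide)]
      exact congrArg (pvV3 ++ ·) ih
  | case5 c t h1 h2 h3 h4 ih =>
      obtain ⟨x', hx⟩ := List.isPrefixOf_iff_prefix.mp h4
      simp only [pvK4, List.cons_append] at hx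
      obtain ⟨hc, ht⟩ := List.cons_eq_cons.mp hx
      subst hc; subst ht
      simp only [List.drop_succ_cons, List.drop_zero, List.nil_append] at *
      unfold pvChain
      rw [show ('&'::'g'::'t'::';'::x' : List Char) = ('&'::['g','t',';']) ++ x' by simp,
          pvRepl_append '&' ['d','e','g',';'] pvV1 ('&'::['g','t',';']) _ (by decide),
          pvRepl_append '&' ['l','t',';','='] pvV2 ('&'::['g','t',';']) _ (by decide),
          pvRepl_append '&' ['l','t',';'] pvV3 ('&'::['g','t',';']) _ (by decide),
          pvRepl_fire,
          pvRepl_append '^' ['{','-','1','}'] pvV5 pvV4 _ (by decide)]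
      exact congrArg (pvV4 ++ ·) ih
  | case6 c t h1 h2 h3 h4 h5 ih =>
      obtain ⟨x', hx⟩ := List.isPrefixOf_iff_prefix.mp h5
      simp only [pvK5, List.cons_append] at hx
      obtain ⟨hc, ht⟩ := List.cons_eq_cons.mp hx
      subst hc; subst ht
      simp only [List.drop_succ_cons, List.drop_zero, List.nil_append] at *
      unfold pvChain
      rw [show ('^'::'{'::'-'::'1'::'}'::x' : List Char) = ('^'::['{','-','1','}']) ++ x' by simp,
          pvRepl_append '&' ['d','e','g',';'] pvV1 ('^'::['{','-','1','}']) _ (by decide),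
          pvRepl_append '&' ['l','t',';','='] pvV2 ('^'::['{','-','1','}']) _ (by decide),
          pvRepl_append '&' ['l','t',';'] pvV3 ('^'::['{','-','1','}']) _ (by decide),
          pvRepl_append '&' ['g','t',';'] pvV4 ('^'::['{','-','1','}']) _ (by decide),
          pvRepl_fire]
      exact congrArg (pvV5 ++ ·) ih
  | case7 c t h1 h2 h3 h4 h5 ih =>
      have step : ∀ (o : Char) (os new y : List Char),
          (o :: os).isPrefixOf (c :: y) = false →
          pvRepl o os new (c :: y) = c :: pvRepl o os new y := by
        intro o os new y hy
        rw [pvRepl]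
        simp [hy]
      have h1' : (('&'::['d','e','g',';']) : List Char).isPrefixOf (c :: t) = false :=
        Bool.eq_false_iff.mpr h1
      have e1 := step '&' ['d','e','g',';'] pvV1 t h1'
      have hp2 : (('&'::['l','t',';','=']) : List Char).isPrefixOf (c :: pvRepl '&' ['d','e','g',';'] pvV1 t) = false := by
        by_contra hcon
        have := pvRepl_startsWith '&' ['d','e','g',';'] pvV1 (c :: t) ('&'::['l','t',';','='])
          (by decide) (by rw [e1]; exact Bool.of_not_eq_false hcon)
        exact h2 this
      have e2 := step '&' ['l','t',';','='] pvV2 _ hp2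
      have hp3 : (('&'::['l','t',';']) : List Char).isPrefixOf
          (c :: pvRepl '&' ['l','t',';','='] pvV2 (pvRepl '&' ['d','e','g',';'] pvV1 t)) = false := by
        by_contra hcon
        have hb : (('&'::['l','t',';']) : List Char).isPrefixOf
            (pvRepl '&' ['l','t',';','='] pvV2 (pvRepl '&' ['d','e','g',';'] pvV1 (c :: t))) = true := by
          rw [e1, e2]; exact Bool.of_not_eq_false hcon
        have hbb := pvRepl_startsWith '&' ['l','t',';','='] pvV2 _ _ (by decide) hb
        have := pvRepl_startsWith '&' ['d','e','g',';'] pvV1 (c :: t) _ (by decide) hbb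
        exact h3 this
      have e3 := step '&' ['l','t',';'] pvV3 _ hp3
      have hp4 : (('&'::['g','t',';']) : List Char).isPrefixOf
          (c :: pvRepl '&' ['l','t',';'] pvV3 (pvRepl '&' ['l','t',';','='] pvV2 (pvRepl '&' ['d','e','g',';'] pvV1 t))) = false := by
        by_contra hcon
        have hb : (('&'::['g','t',';']) : List Char).isPrefixOf
            (pvRepl '&' ['l','t',';'] pvV3 (pvRepl '&' ['l','t',';','='] pvV2 (pvRepl '&' ['d','e','g',';'] pvV1 (c :: t)))) = true := by
          rw [e1, e2, e3]; exact Bool.of_not_eq_false hcon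
        have hb3 := pvRepl_startsWith '&' ['l','t',';'] pvV3 _ _ (by decide) hb
        have hb2 := pvRepl_startsWith '&' ['l','t',';','='] pvV2 _ _ (by decide) hb3
        have := pvRepl_startsWith '&' ['d','e','g',';'] pvV1 (c :: t) _ (by decide) hb2
        exact h4 this
      have e4 := step '&' ['g','t',';'] pvV4 _ hp4
      have hp5 : (('^'::['{','-','1','}']) : List Char).isPrefixOf
          (c :: pvRepl '&' ['g','t',';'] pvV4 (pvRepl '&' ['l','t',';'] pvV3 (pvRepl '&' ['l','t',';','='] pvV2 (pvRepl '&' ['d','e','g',';'] pvV1 t)))) = false := by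
        by_contra hcon
        have hb : (('^'::['{','-','1','}']) : List Char).isPrefixOf
            (pvRepl '&' ['g','t',';'] pvV4 (pvRepl '&' ['l','t',';'] pvV3 (pvRepl '&' ['l','t',';','='] pvV2 (pvRepl '&' ['d','e','g',';'] pvV1 (c :: t))))) = true := by
          rw [e1, e2, e3, e4]; exact Bool.of_not_eq_false hcon
        have hb4 := pvRepl_startsWith '&' ['g','t',';'] pvV4 _ _ (by decide) hb
        have hb3 := pvRepl_startsWith '&' ['l','t',';'] pvV3 _ _ (by decide) hb4
        have hb2 := pvRepl_startsWith '&' ['l','t',';','='] pvV2 _ _ (by decide) hb3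
        have := pvRepl_startsWith '&' ['d','e','g',';'] pvV1 (c :: t) _ (by decide) hb2
        exact h5 this
      have e5 := step '^' ['{','-','1','}'] pvV5 _ hp5
      unfold pvChain at ih ⊢
      rw [e1, e2, e3, e4, e5, ih]

theorem pvA_toList (s : String) :
    (symbol_replacer s).toList = pvChain s.toList := by
  show (List.foldl (fun s kv => PySem.Str.replace s kv.1 kv.2) s
      ((((((PySem.Dict.empty : PySem.Dict String String).insert "&deg;" "{\\circ}").insert
          "&lt;=" "≤").insert "&lt;" "<").insert "&gt;" ">").insert
          "^{-1}" "<sup>-1</sup>").items).toList = pvChain s.toList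
  rw [show ((((((PySem.Dict.empty : PySem.Dict String String).insert "&deg;" "{\\circ}").insert
          "&lt;=" "≤").insert "&lt;" "<").insert "&gt;" ">").insert
          "^{-1}" "<sup>-1</sup>").items
      = [("&deg;","{\\circ}"), ("&lt;=","≤"), ("&lt;","<"), ("&gt;",">"), ("^{-1}","<sup>-1</sup>")] from rfl]
  simp only [List.foldl, PySem.Str.toList_replace]
  unfold pvChain
  rw [show ("&deg;" : String).toList = '&' :: ['d','e','g',';'] by rfl,
      show ("&lt;=" : String).toList = '&' :: ['l','t',';','='] by rfl,
      show ("&lt;" : String).toList = '&' :: ['l','t',';'] by rfl,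
      show ("&gt;" : String).toList = '&' :: ['g','t',';'] by rfl,
      show ("^{-1}" : String).toList = '^' :: ['{','-','1','}'] by rfl]
  rw [pvReplace_eq, pvReplace_eq, pvReplace_eq, pvReplace_eq, pvReplace_eq]
  rfl

-- ===== VERDICT (by name: the statement is the Claim_ definition above) =====
theorem symbol_replacer_spec : Claim_equal_symbol_replacer := by
  intro s _
  unfold Spec_symbol_replacer symbol_replacer_alt
  rw [← pvChain_eq_altGo, ← pvA_toList, String.ofList_toList]
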